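-- pv_equiv track=rewrite | github.com/hnjog/Algorithm | 백준/Silver/9020. 골드바흐의 추측/골드바흐의 추측.py | goldBahsGuess
-- ===== SOURCE A (Python) =====
-- def checkSosu(num :int)->bool:
--     if num < 2:
--         return False
--
--     maxCh = num//2 + 1
--
--     for n in range(2,maxCh):
--         if num % n == 0:
--             return False
--
--     return True
--
-- def goldBahsGuess(num : int):
--     maxCheck = num // 2 + 1 # 절반부터 검사하면 될듯하다 어차피 절반으로 나누면 나머지는 큰쪽일테니
--     minS = 0 # 작은 소수
--     maxS = 0 # 큰 소수
--
--     # 2부터 maxCheck까지 역순으로 반복문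
--     # range의 2번째 요소는 -1까지 이므로
--     for i in range(maxCheck,1,-1):
--         if checkSosu(i):
--             checkNumber = num - i
--             if checkSosu(checkNumber):
--                 maxS = checkNumber
--                 minS = i
--                 break
--
--     if maxS < minS:
--         a = maxS
--         maxS = minS
--         minS = a
--
--     a = [minS,maxS]
--     return a
-- ===== SOURCE B (Python) =====
-- def goldBahsGuess(num: int):
--     # primality by trial division stopping at sqrt(k) instead of A's scan up to k//2
--     def isPrime(k: int) -> bool:
--         if k < 2:
--             return False
--         for d in range(2, k):
--             if d * d > k:
--                 return True
--             if k % d == 0: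
--                 return False
--         return True
--
--     half = next((i for i in range(num // 2 + 1, 1, -1)
--                  if isPrime(i) and isPrime(num - i)), None)
--     if half is None:
--         return [0, 0]
--     return [min(half, num - half), max(half, num - half)]
-- ===== Notes on version B (the rewrite author's own statement) =====
-- stated objective: alternative
-- what changed: B tests primality by trial division that stops once the trial divisor squared exceeds the candidate, instead of A's trial division over all divisors up to half the candidate, and replaces A's break-and-swap loop state with a find-first scan that returns the sorted pair via min/max.
import Mathlib
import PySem

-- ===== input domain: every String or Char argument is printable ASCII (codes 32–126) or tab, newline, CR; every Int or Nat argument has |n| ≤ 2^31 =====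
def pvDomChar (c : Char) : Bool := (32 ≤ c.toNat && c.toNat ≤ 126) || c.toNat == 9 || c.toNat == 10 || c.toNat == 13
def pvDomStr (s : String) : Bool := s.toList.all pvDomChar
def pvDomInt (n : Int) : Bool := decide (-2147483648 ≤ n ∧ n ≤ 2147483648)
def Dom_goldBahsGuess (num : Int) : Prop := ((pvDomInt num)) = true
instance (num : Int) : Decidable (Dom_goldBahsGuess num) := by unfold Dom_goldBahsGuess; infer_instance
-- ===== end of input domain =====

-- B tests each candidate by trial division that stops once the divisor squared exceeds it
-- (A divides by every candidate divisor up to half), and uses a find-first scan instead of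
-- A's break-and-swap loop state; objective: alternative.

-- ===== PORT A =====
-- checkSosu: False if num < 2, else no divisor n in range(2, num//2 + 1)
def checkSosu (num : Int) : Bool :=
  if num < 2 then false
  else (PySem.List.pyRange 2 (PySem.Int.floordiv num 2 + 1) 1).all
         (fun n => decide (PySem.Int.mod num n ≠ 0))

-- the for-loop with break: state (maxS, minS), initially (0, 0); break sets (num - i, i)
def gbLoop (num : Int) : List Int → Int × Int
  | [] => (0, 0)
  | i :: rest =>
      if checkSosu i then
        (if checkSosu (num - i) then (num - i, i) else gbLoop num rest)
      else gbLoop num rest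

-- the final swap: p = (maxS, minS); if maxS < minS swap them, return [minS, maxS]
def gbSwap (p : Int × Int) : List Int :=
  if p.1 < p.2 then [p.1, p.2] else [p.2, p.1]

def goldBahsGuess (num : Int) : List Int :=
  gbSwap (gbLoop num (PySem.List.pyRange (PySem.Int.floordiv num 2 + 1) 1 (-1)))

-- ===== PORT B =====
-- for d in range(2, k): return True early once d*d > k; trial division otherwise
def trialList (k : Int) : List Int → Bool
  | [] => true
  | d :: rest =>
      if k < d * d then true
      else if PySem.Int.mod k d = 0 then false
      else trialList k rest

def isPrimeAlt (k : Int) : Bool :=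
  if k < 2 then false else trialList k (PySem.List.pyRange 2 k 1)

def goldBahsGuess_alt (num : Int) : List Int :=
  match (PySem.List.pyRange (PySem.Int.floordiv num 2 + 1) 1 (-1)).find?
          (fun i => isPrimeAlt i && isPrimeAlt (num - i)) with
  | some half => [min half (num - half), max half (num - half)]
  | none => [0, 0]

-- ===== PRECONDITION & SPEC =====
def Spec_goldBahsGuess (num : Int) (out : List Int) : Prop := out = goldBahsGuess_alt num
instance (num : Int) (out : List Int) : Decidable (Spec_goldBahsGuess num out) := by unfold Spec_goldBahsGuess; infer_instance

-- ===== CLAIM (what is proved, stated in full; the proofs are below) =====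
def Claim_equal_goldBahsGuess : Prop := ∀ (num : Int), Dom_goldBahsGuess num → Spec_goldBahsGuess num (goldBahsGuess num)

-- ===== LEMMAS AND PROOFS =====

-- A's test says: no divisor n with 2 ≤ n ≤ k/2
lemma checkSosu_eq_true_iff (k : Int) :
    checkSosu k = true ↔ 2 ≤ k ∧ ∀ n : Int, 2 ≤ n → n ≤ PySem.Int.floordiv k 2 → ¬ (n ∣ k) := by
  unfold checkSosu
  split_ifs with h
  · simp; omega
  · simp only [List.all_eq_true, PySem.List.mem_pyRange_one, decide_eq_true_eq]
    constructor
    · intro H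
      refine ⟨by omega, fun n h2 hle hdvd => ?_⟩
      exact H n ⟨h2, by omega⟩ ((PySem.Int.mod_eq_zero_iff_dvd k n).mpr hdvd)
    · rintro ⟨-, H⟩ n ⟨h2, hlt⟩ hmod
      exact H n h2 (by omega) ((PySem.Int.mod_eq_zero_iff_dvd k n).mp hmod)

-- B's loop from d says: no divisor e with d ≤ e and e*e ≤ k
lemma trialList_eq_true_iff (k : Int) : ∀ (d : Int), 2 ≤ d →
    (trialList k (PySem.List.pyRange d k 1) = true ↔
      ∀ e : Int, d ≤ e → e * e ≤ k → ¬ (e ∣ k)) := by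
  intro d hd
  generalize hm : (k - d).toNat = m
  induction m using Nat.strong_induction_on generalizing d with
  | _ m ih =>
    rcases le_or_gt k d with hkd | hdk
    · rw [PySem.List.pyRange_one_eq_nil hkd]
      simp only [trialList, true_iff]
      intro e hde hsqe
      exact absurd hsqe (by nlinarith)
    · rw [PySem.List.pyRange_one_cons hdk]
      simp only [trialList]
      split_ifs with hsq hmod
      · -- k < d*d: loop returns True; RHS vacuous
        simp only [true_iff]
        intro e hde hsqe
        exact absurd hsqe (by nlinarith)
      · -- divisor found
        simp only [false_iff]
        push Not
        exact ⟨d, le_refl d, by omega, (PySem.Int.mod_eq_zero_iff_dvd k d).mp hmod⟩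
      · -- recurse with d+1
        rw [ih (k - (d + 1)).toNat (by omega) (d + 1) (by omega) rfl]
        constructor
        · intro H e hde hsqe hdvd
          rcases eq_or_lt_of_le hde with heq | hlt
          · subst heq; exact hmod ((PySem.Int.mod_eq_zero_iff_dvd k d).mpr hdvd)
          · exact H e (by omega) hsqe hdvd
        · intro H e hde hsqe hdvd
          exact H e (by omega) hsqe hdvd

-- both sides characterize primality of k.toNat (for k ≥ 2); we show they agree directly
lemma checkSosu_eq_isPrimeAlt (k : Int) : checkSosu k = isPrimeAlt k := by
  unfold isPrimeAlt
  split_ifs with h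
  · unfold checkSosu; simp [h]
  · have h2k : 2 ≤ k := by omega
    rw [Bool.eq_iff_iff, checkSosu_eq_true_iff, trialList_eq_true_iff k 2 (by norm_num)]
    have hfd : PySem.Int.floordiv k 2 = k / 2 :=
      PySem.Int.floordiv_eq_ediv_of_pos (by norm_num)
    rw [hfd]
    constructor
    · -- no divisor up to k/2  →  no divisor e with e*e ≤ k
      rintro ⟨-, H⟩ e h2e hsq hdvd
      have he2 : 2 ≤ e := h2e
      have : e ≤ k / 2 := by
        have : 2 * e ≤ e * e := by nlinarith
        omega
      exact H e he2 this hdvd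
    · -- no divisor e with 2 ≤ e, e*e ≤ k  →  no divisor up to k/2
      intro H
      refine ⟨h2k, fun n h2n hle hdvd => ?_⟩
      -- n ∣ k, 2 ≤ n ≤ k/2; take c = k / n, then n * c = k, c ≥ 2, and min n c squared ≤ k
      obtain ⟨c, hc⟩ := hdvd
      have hn0 : 0 < n := by omega
      have hk0 : 0 < k := by omega
      have h2nk : 2 * n ≤ k := by omega
      have hc2 : 2 ≤ c := by nlinarith
      rcases le_total n c with hnc | hcn
      · exact H n h2n (by nlinarith) ⟨c, hc⟩
      · exact H c hc2 (by nlinarith) ⟨n, by rw [hc]; ring⟩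

-- gbLoop is find?
lemma gbLoop_eq_find? (num : Int) (xs : List Int) :
    gbLoop num xs =
      match xs.find? (fun i => checkSosu i && checkSosu (num - i)) with
      | some i => (num - i, i)
      | none => (0, 0) := by
  induction xs with
  | nil => rfl
  | cons i rest ih =>
    by_cases h1 : checkSosu i = true
    · by_cases h2 : checkSosu (num - i) = true
      · simp [gbLoop, List.find?, h1, h2]
      · simp only [Bool.not_eq_true] at h2
        simp [gbLoop, List.find?, h1, h2, ih]
    · simp only [Bool.not_eq_true] at h1
      simp [gbLoop, List.find?, h1, ih]

-- ===== VERDICT (by name: the statement is the Claim_ definition above) =====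
theorem goldBahsGuess_spec : Claim_equal_goldBahsGuess := by
  intro num _
  unfold Spec_goldBahsGuess goldBahsGuess goldBahsGuess_alt
  have hpred : (fun i => checkSosu i && checkSosu (num - i))
             = (fun i => isPrimeAlt i && isPrimeAlt (num - i)) := by
    funext i; rw [checkSosu_eq_isPrimeAlt, checkSosu_eq_isPrimeAlt]
  rw [gbLoop_eq_find?, hpred]
  cases hf : (PySem.List.pyRange (PySem.Int.floordiv num 2 + 1) 1 (-1)).find?
      (fun i => isPrimeAlt i && isPrimeAlt (num - i)) with
  | none => simp [gbSwap]
  | some i =>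
    simp only [gbSwap]
    rcases le_total i (num - i) with h | h
    · rw [min_eq_left h, max_eq_right h]
      split_ifs with hlt
      · exact absurd hlt (by omega)
      · rfl
    · rw [min_eq_right h, max_eq_left h]
      split_ifs with hlt
      · rfl
      · have he : num - i = i := by omega
        rw [he]
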